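-- pv_equiv track=rewrite | github.com/utkarshgarg123/codes_interviewbit | array/minimum_lights_to_activate.py | solve
-- ===== SOURCE A (Python) =====
-- def solve(A, B):
--     i, n, bulb = 0, len(A), 0
--     while i < n:
--         flag = False
--         j = min(i+B-1, n-1)
--         while j>=i-B+1 and j<n and j>0:
--             if A[j] ==1:
--                 flag = True
--                 bulb += 1
--                 i = j + B
--                 break
--             j -= 1
--         if not flag:
--             return -1
--     return bulb
-- ===== SOURCE B (Python) =====
-- def solve(A, B):
--     n = len(A)
--     prev = []
--     last = -1
--     for k in range(n):
--         if A[k] == 1: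
--             last = k
--         prev.append(last)
--     bulbs = 0
--     i = 0
--     while i < n:
--         rt = min(i + B - 1, n - 1)
--         if rt < 0:
--             return -1
--         j = prev[rt]
--         if j == -1 or j < i - B + 1:
--             return -1
--         bulbs += 1
--         i = j + B
--     return bulbs
-- ===== Notes on version B (the rewrite author's own statement) =====
-- stated objective: alternative
-- what changed: B precomputes a previous-bulb index array in one pass so each greedy step does a single array lookup instead of A's backwards scan over the window, and B allows the bulb at index 0 which A's scan condition j>0 skips.
-- intended difference: On inputs where B >= 1, the only bulb that reaches position 0 is the bulb at index 0 itself and every position is within B-1 of some bulb, A returns -1 because its inner scan condition j>0 never inspects index 0, while B returns the correct positive bulb count; the bulb at index 0 is a legitimate choice, so B's value is the intended one. — e.g. on solve([1, 0], 2): A returns -1, B returns 1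
import Mathlib
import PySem

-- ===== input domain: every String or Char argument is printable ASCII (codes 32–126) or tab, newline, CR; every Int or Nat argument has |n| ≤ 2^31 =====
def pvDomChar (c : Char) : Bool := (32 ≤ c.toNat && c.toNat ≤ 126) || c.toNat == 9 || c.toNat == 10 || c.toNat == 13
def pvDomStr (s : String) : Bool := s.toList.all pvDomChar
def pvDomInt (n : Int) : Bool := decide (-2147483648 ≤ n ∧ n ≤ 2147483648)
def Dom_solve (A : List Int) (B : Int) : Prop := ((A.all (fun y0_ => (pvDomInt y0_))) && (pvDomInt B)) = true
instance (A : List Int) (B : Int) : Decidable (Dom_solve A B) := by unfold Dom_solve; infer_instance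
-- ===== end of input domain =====

-- B replaces A's per-step inner backwards scan by a previous-bulb index array
-- precomputed in one pass, so each greedy step is a single array lookup, and does not
-- reproduce A's off-by-one that forbids using the bulb at index 0 (see D_solve below).
-- Both while-loops are ported with an explicit fuel argument that is provably
-- sufficient (each iteration moves i forward by at least 1, resp. j down by 1),
-- so the fuel-0 arm is never reached on any input.

-- ===== PORT A =====
-- inner while loop of A: scan j downwards, return the index found (break) or none (loop exit → not flag)
def solveScan (A : List Int) (n B i : Int) : Nat → Int → Option Int
  | 0, _ => none              -- unreachable: fuel invariant j.toNat < fuel; when j ≤ 0 the guard 0 < j is false anyway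
  | fuel + 1, j =>
    if i - B + 1 ≤ j ∧ j < n ∧ 0 < j then
      if PySem.List.pyGetD A j 0 = 1 then some j   -- A[j] guarded by 0 < j < n, so in range
      else solveScan A n B i fuel (j - 1)
    else none

-- outer while loop of A
def solveLoop (A : List Int) (n B : Int) : Nat → Int → Int → Int
  | 0, _, bulb => bulb        -- unreachable: fuel invariant (n - i).toNat < fuel
  | fuel + 1, i, bulb =>
    if i < n then
      match solveScan A n B i ((min (i + B - 1) (n - 1)).toNat + 1) (min (i + B - 1) (n - 1)) with
      | some j => solveLoop A n B fuel (j + B) (bulb + 1)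
      | none => -1
    else bulb

def solve (A : List Int) (B : Int) : Int :=
  solveLoop A (PySem.List.len A) B ((PySem.List.len A).toNat + 1) 0 0

-- ===== PORT B =====
-- prev[k] = index of the rightmost 1 at position ≤ k, or -1 (built in one pass)
def buildPrev (A : List Int) : List Int :=
  ((PySem.List.pyRange 0 (PySem.List.len A) 1).foldl
    (fun (acc : List Int × Int) k =>
      let last := if PySem.List.pyGetD A k 0 = 1 then k else acc.2
      (acc.1 ++ [last], last))
    (([] : List Int), (-1 : Int))).1

def altLoop (prevL : List Int) (n B : Int) : Nat → Int → Int → Int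
  | 0, _, bulbs => bulbs      -- unreachable: fuel invariant (n - i).toNat < fuel
  | fuel + 1, i, bulbs =>
    if i < n then
      if min (i + B - 1) (n - 1) < 0 then -1
      else
        -- j := prev[rt]; 0 ≤ rt < n so the Python indexing is in range
        if PySem.List.pyGetD prevL (min (i + B - 1) (n - 1)) (-1) = -1 ∨
           PySem.List.pyGetD prevL (min (i + B - 1) (n - 1)) (-1) < i - B + 1 then -1
        else altLoop prevL n B fuel (PySem.List.pyGetD prevL (min (i + B - 1) (n - 1)) (-1) + B) (bulbs + 1)
    else bulbs

def solve_alt (A : List Int) (B : Int) : Int :=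
  altLoop (buildPrev A) (PySem.List.len A) B ((PySem.List.len A).toNat + 1) 0 0

-- ===== PRECONDITION & SPEC =====
-- On inputs where (B ≥ 1 and) the only bulb reaching position 0 is the bulb AT index 0 and
-- every position is within B-1 of some bulb, A returns -1 (its scan condition j>0 never
-- inspects index 0) while B returns the correct positive bulb count, which is the intended
-- answer since the bulb at index 0 is a legitimate choice.
def D_solve (A : List Int) (B : Int) : Prop :=
  A.getD 0 0 = 1 ∧
  (∀ k < A.length, A.getD k 0 = 1 → k = 0 ∨ B ≤ (k : Int)) ∧
  (∀ p < A.length, ∃ j < A.length, A.getD j 0 = 1 ∧ |(p : Int) - (j : Int)| < B)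
instance (A : List Int) (B : Int) : Decidable (D_solve A B) := by unfold D_solve; infer_instance

def Spec_solve (A : List Int) (B : Int) (out : Int) : Prop := ¬ D_solve A B → out = solve_alt A B
instance (A : List Int) (B : Int) (out : Int) : Decidable (Spec_solve A B out) := by unfold Spec_solve; infer_instance

def pvDiffWitness_solve : List Int × Int := ([1, 0], 2)
def pvDiffWitnessOut_solve : Int × Int := (-1, 1)

-- ===== CLAIM (what is proved, stated in full; the proofs are below) =====
def Claim_unchanged_solve : Prop := ∀ (A : List Int) (B : Int), Dom_solve A B → Spec_solve A B (solve A B)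
def Claim_changed_solve : Prop := Dom_solve (pvDiffWitness_solve.1) (pvDiffWitness_solve.2) ∧ D_solve (pvDiffWitness_solve.1) (pvDiffWitness_solve.2) ∧ solve (pvDiffWitness_solve.1) (pvDiffWitness_solve.2) = pvDiffWitnessOut_solve.1 ∧ solve_alt (pvDiffWitness_solve.1) (pvDiffWitness_solve.2) = pvDiffWitnessOut_solve.2 ∧ pvDiffWitnessOut_solve.1 ≠ pvDiffWitnessOut_solve.2
def Claim_exact_solve : Prop := ∀ (A : List Int) (B : Int), Dom_solve A B → D_solve A B → solve A B ≠ solve_alt A B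

-- ===== LEMMAS AND PROOFS =====

-- full characterisation of A's inner scan: `some j` is the largest admissible bulb index
theorem solveScan_some (A : List Int) (n B i : Int) :
    ∀ (f : Nat) (j0 j : Int), solveScan A n B i f j0 = some j →
      i - B + 1 ≤ j ∧ j < n ∧ 0 < j ∧ j ≤ j0 ∧ PySem.List.pyGetD A j 0 = 1 ∧
        ∀ m, j < m → m ≤ j0 → PySem.List.pyGetD A m 0 ≠ 1 := by
  intro f
  induction f with
  | zero =>
    intro j0 j hj
    simp only [solveScan] at hj
    exact absurd hj (by simp)
  | succ f ih =>
    intro j0 j hj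
    simp only [solveScan] at hj
    split at hj
    · rename_i h
      split at hj
      · rename_i hA
        cases hj
        exact ⟨h.1, h.2.1, h.2.2, le_rfl, hA, fun m hm1 hm2 => by exfalso; omega⟩
      · rename_i hA
        obtain ⟨c1, c2, c3, c4, c5, c6⟩ := ih (j0 - 1) j hj
        refine ⟨c1, c2, c3, by omega, c5, fun m hm1 hm2 => ?_⟩
        by_cases hm : m = j0
        · subst hm; exact hA
        · exact c6 m hm1 (by omega)
    · exact absurd hj (by simp)

theorem solveScan_none (A : List Int) (n B i : Int) :
    ∀ (f : Nat) (j0 : Int), j0.toNat < f → j0 < n → solveScan A n B i f j0 = none →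
      ∀ m, i - B + 1 ≤ m → 0 < m → m ≤ j0 → PySem.List.pyGetD A m 0 ≠ 1 := by
  intro f
  induction f with
  | zero => intro j0 hf; omega
  | succ f ih =>
    intro j0 hf hn hj m hm1 hm2 hm3
    simp only [solveScan] at hj
    split at hj
    · rename_i h
      split at hj
      · exact absurd hj (by simp)
      · rename_i hA
        by_cases hm : m = j0
        · subst hm; exact hA
        · exact ih (j0 - 1) (by omega) (by omega) hj m hm1 hm2 (by omega)
    · rename_i h
      exfalso; omega

-- spec function for B's prev array
def lastIdx (A : List Int) : Nat → Int
  | 0 => if A.getD 0 0 = 1 then 0 else -1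
  | (k+1) => if A.getD (k+1) 0 = 1 then ((k+1 : Nat) : Int) else lastIdx A k

theorem buildPrev_fold (A : List Int) : ∀ m : Nat,
    (PySem.List.pyRange 0 (m : Int) 1).foldl
      (fun (acc : List Int × Int) k =>
        let last := if PySem.List.pyGetD A k 0 = 1 then k else acc.2
        (acc.1 ++ [last], last)) (([] : List Int), (-1 : Int))
    = ((List.range m).map (lastIdx A), if m = 0 then -1 else lastIdx A (m - 1)) := by
  intro m
  induction m with
  | zero => simp [PySem.List.pyRange_one_eq_nil (le_refl (0 : Int))]
  | succ m ih =>
    have hsucc : ((m + 1 : Nat) : Int) = (m : Int) + 1 := by push_cast; ring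
    rw [hsucc, PySem.List.pyRange_one_succ_right (by exact_mod_cast Nat.zero_le m)]
    rw [List.foldl_append, ih]
    simp only [List.foldl_cons, List.foldl_nil, List.range_succ, List.map_append, List.map_cons,
      List.map_nil, PySem.List.pyGetD_natCast]
    cases m with
    | zero => by_cases hA : A.getD 0 0 = 1 <;> simp [lastIdx, hA]
    | succ m' => by_cases hA : A.getD (m' + 1) 0 = 1 <;> simp [lastIdx, hA]

theorem buildPrev_eq (A : List Int) : buildPrev A = (List.range A.length).map (lastIdx A) := by
  rw [buildPrev]
  rw [show PySem.List.len A = ((A.length : Nat) : Int) from by simp]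
  rw [buildPrev_fold A A.length]

theorem prev_getD (A : List Int) (r : Int) (h0 : 0 ≤ r) (hr : r < (A.length : Int)) :
    PySem.List.pyGetD (buildPrev A) r (-1) = lastIdx A r.toNat := by
  rw [buildPrev_eq]
  rw [show r = ((r.toNat : Nat) : Int) from by omega]
  rw [PySem.List.pyGetD_natCast]
  rw [List.getD_eq_getElem _ _ (by simp; omega)]
  simp
  congr 1
  omega

theorem lastIdx_le (A : List Int) (k : Nat) : lastIdx A k ≤ (k : Int) := by
  induction k with
  | zero => simp only [lastIdx]; split <;> omega
  | succ k ih => simp only [lastIdx]; split <;> push_cast <;> omega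

theorem lastIdx_ge_neg_one (A : List Int) (k : Nat) : -1 ≤ lastIdx A k := by
  induction k with
  | zero => simp only [lastIdx]; split <;> omega
  | succ k ih => simp only [lastIdx]; split <;> [push_cast; skip] <;> omega

theorem lastIdx_bulb (A : List Int) (k : Nat) (h : 0 ≤ lastIdx A k) :
    A.getD (lastIdx A k).toNat 0 = 1 := by
  induction k with
  | zero =>
    by_cases hA : A.getD 0 0 = 1
    · simp only [lastIdx, if_pos hA]; simpa using hA
    · exfalso; simp only [lastIdx, if_neg hA] at h; omega
  | succ k ih =>
    by_cases hA : A.getD (k + 1) 0 = 1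
    · simp only [lastIdx, if_pos hA]
      rw [show ((((k + 1 : Nat)) : Int)).toNat = k + 1 from by omega]
      exact hA
    · simp only [lastIdx, if_neg hA] at h ⊢; exact ih h

theorem lastIdx_ge_bulb (A : List Int) (k : Nat) :
    ∀ m : Nat, m ≤ k → A.getD m 0 = 1 → (m : Int) ≤ lastIdx A k := by
  induction k with
  | zero =>
    intro m hm hb
    interval_cases m
    simp only [lastIdx, if_pos hb, Nat.cast_zero, le_refl]
  | succ k ih =>
    intro m hm hb
    simp only [lastIdx]
    split
    · push_cast; omega
    · rename_i hA
      by_cases hmk : m = k + 1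
      · subst hmk; exact absurd hb hA
      · exact ih m (by omega) hb

-- bridge: pyGetD on a nonnegative Int index is getD at toNat
theorem pyGetD_toNat (A : List Int) (m : Int) (h0 : 0 ≤ m) :
    PySem.List.pyGetD A m 0 = A.getD m.toNat 0 := by
  rw [show m = ((m.toNat : Nat) : Int) from by omega, PySem.List.pyGetD_natCast]
  simp
  have hmx : max m 0 = m := by omega
  rw [hmx]

-- the prev value at rt agrees with what A's scan finds
theorem prev_of_scan_some (A : List Int) (B i rt j : Int) (f : Nat)
    (h0 : 0 ≤ rt) (hrn : rt < (A.length : Int))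
    (hs : solveScan A (A.length : Int) B i f rt = some j) :
    lastIdx A rt.toNat = j := by
  obtain ⟨c1, c2, c3, c4, c5, c6⟩ := solveScan_some A _ B i f rt j hs
  have hgeb : (j.toNat : Int) ≤ lastIdx A rt.toNat := by
    apply lastIdx_ge_bulb A rt.toNat j.toNat (by omega)
    rw [← pyGetD_toNat A j (by omega)]
    exact c5
  have hle := lastIdx_le A rt.toNat
  by_contra hne
  have hgt : j < lastIdx A rt.toNat := by omega
  have hp0 : 0 ≤ lastIdx A rt.toNat := by omega
  have hb := lastIdx_bulb A rt.toNat hp0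
  have hnb := c6 (lastIdx A rt.toNat) hgt (by omega)
  rw [pyGetD_toNat A _ hp0] at hnb
  exact hnb hb

theorem prev_of_scan_none (A : List Int) (B i rt : Int) (f : Nat) (hf : rt.toNat < f)
    (h0 : 0 ≤ rt) (hrn : rt < (A.length : Int))
    (hs : solveScan A (A.length : Int) B i f rt = none) :
    lastIdx A rt.toNat < i - B + 1 ∨ lastIdx A rt.toNat ≤ 0 := by
  by_contra hc
  push_neg at hc
  obtain ⟨hc1, hc2⟩ := hc
  have hp0 : (0 : Int) ≤ lastIdx A rt.toNat := by omega
  have hb := lastIdx_bulb A rt.toNat hp0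
  have hle := lastIdx_le A rt.toNat
  have hnb := solveScan_none A _ B i f rt hf hrn hs
      (lastIdx A rt.toNat) (by omega) (by omega) (by omega)
  rw [pyGetD_toNat A _ hp0] at hnb
  exact hnb hb

-- the two greedy loops agree from any state with B ≤ i (same fuel on both sides)
theorem loops_eq (A : List Int) (B : Int) (hB : 1 ≤ B) :
    ∀ (f : Nat) (i bulb : Int), ((A.length : Int) - i).toNat < f → B ≤ i →
      solveLoop A (A.length : Int) B f i bulb = altLoop (buildPrev A) (A.length : Int) B f i bulb := by
  intro f
  induction f with
  | zero => intro i bulb hf; omega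
  | succ f ih =>
    intro i bulb hf hBi
    simp only [solveLoop, altLoop]
    by_cases hi : i < (A.length : Int)
    · rw [if_pos hi, if_pos hi]
      have hrt1 : (1 : Int) ≤ min (i + B - 1) ((A.length : Int) - 1) := by omega
      have hprev := prev_getD A (min (i + B - 1) ((A.length : Int) - 1)) (by omega) (by omega)
      rw [if_neg (by omega : ¬ min (i + B - 1) ((A.length : Int) - 1) < 0)]
      split
      · rename_i j heq
        have hpj := prev_of_scan_some A B i _ j _ (by omega) (by omega) heq
        obtain ⟨c1, c2, c3, c4, c5, c6⟩ := solveScan_some A _ B i _ _ j heq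
        rw [hprev, hpj]
        rw [if_neg (by omega : ¬ (j = -1 ∨ j < i - B + 1))]
        exact ih (j + B) (bulb + 1) (by omega) (by omega)
      · rename_i heq
        have hp := prev_of_scan_none A B i _ _ (by omega) (by omega) (by omega) heq
        have hgen := lastIdx_ge_neg_one A (min (i + B - 1) ((A.length : Int) - 1)).toNat
        rw [hprev, if_pos (by omega :
          lastIdx A (min (i + B - 1) ((A.length : Int) - 1)).toNat = -1 ∨
          lastIdx A (min (i + B - 1) ((A.length : Int) - 1)).toNat < i - B + 1)]
    · rw [if_neg hi, if_neg hi]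

-- if some position p0 is not within B-1 of any bulb, B's loop started at i ≤ p0 fails
theorem alt_fail (A : List Int) (B : Int) (hB : 1 ≤ B) (p0 : Int) (hp0 : 0 ≤ p0)
    (hp0n : p0 < (A.length : Int))
    (hunc : ∀ m : Nat, m < A.length → A.getD m 0 = 1 → B - 1 < |p0 - (m : Int)|) :
    ∀ (f : Nat) (i bulbs : Int), ((A.length : Int) - i).toNat < f → i ≤ p0 →
      altLoop (buildPrev A) (A.length : Int) B f i bulbs = -1 := by
  intro f
  induction f with
  | zero => intro i bulbs hf hip; omega
  | succ f ih =>
    intro i bulbs hf hip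
    have hi : i < (A.length : Int) := by omega
    simp only [altLoop]
    rw [if_pos hi]
    by_cases hrt : min (i + B - 1) ((A.length : Int) - 1) < 0
    · rw [if_pos hrt]
    · rw [if_neg hrt]
      have hprev := prev_getD A (min (i + B - 1) ((A.length : Int) - 1)) (by omega) (by omega)
      by_cases hj : PySem.List.pyGetD (buildPrev A) (min (i + B - 1) ((A.length : Int) - 1)) (-1) = -1 ∨
          PySem.List.pyGetD (buildPrev A) (min (i + B - 1) ((A.length : Int) - 1)) (-1) < i - B + 1
      · rw [if_pos hj]
      · rw [if_neg hj]
        push_neg at hj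
        rw [hprev] at hj ⊢
        set p := lastIdx A (min (i + B - 1) ((A.length : Int) - 1)).toNat with hpdef
        have hple := lastIdx_le A (min (i + B - 1) ((A.length : Int) - 1)).toNat
        have hpge := lastIdx_ge_neg_one A (min (i + B - 1) ((A.length : Int) - 1)).toNat
        have hpnn : 0 ≤ p := by omega
        have hb := lastIdx_bulb A _ (hpdef ▸ hpnn)
        have habs := hunc p.toNat (by omega) (by rwa [← hpdef] at hb)
        have hbound : B - 1 < |p0 - (p.toNat : Int)| := habs
        rcases abs_cases (p0 - (p.toNat : Int)) with ⟨he, _⟩ | ⟨he, _⟩ <;>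
        · apply ih (p + B) (bulbs + 1) (by omega) (by omega)

-- if every position is within B-1 of some bulb, B's loop never returns -1
theorem alt_success (A : List Int) (B : Int)
    (hcov : ∀ p : Nat, p < A.length → ∃ m : Nat, m < A.length ∧ A.getD m 0 = 1 ∧
        (p : Int) - (m : Int) ≤ B - 1 ∧ (m : Int) - (p : Int) ≤ B - 1) :
    ∀ (f : Nat) (i bulbs : Int), 0 ≤ i → 0 ≤ bulbs →
      0 ≤ altLoop (buildPrev A) (A.length : Int) B f i bulbs := by
  intro f
  induction f with
  | zero => intro i bulbs h0 hb; simp only [altLoop]; exact hb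
  | succ f ih =>
    intro i bulbs h0 hb
    simp only [altLoop]
    by_cases hi : i < (A.length : Int)
    · rw [if_pos hi]
      obtain ⟨m, hmn, hmb, hc1, hc2⟩ := hcov i.toNat (by omega)
      have hB : 1 ≤ B := by omega
      have hrtge : (m : Int) ≤ min (i + B - 1) ((A.length : Int) - 1) := by omega
      rw [if_neg (by omega : ¬ min (i + B - 1) ((A.length : Int) - 1) < 0)]
      have hprev := prev_getD A (min (i + B - 1) ((A.length : Int) - 1)) (by omega) (by omega)
      have hpgeb : (m : Int) ≤ lastIdx A (min (i + B - 1) ((A.length : Int) - 1)).toNat :=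
        lastIdx_ge_bulb A _ m (by omega) hmb
      rw [if_neg (by rw [hprev]; omega)]
      rw [hprev]
      exact ih _ (bulbs + 1) (by omega) (by omega)
    · rw [if_neg hi]; exact hb

theorem main_eq (A : List Int) (B : Int) (hnd : ¬ D_solve A B) : solve A B = solve_alt A B := by
  rw [solve, solve_alt, show PySem.List.len A = (A.length : Int) from by simp]
  by_cases hA : A = []
  · subst hA
    simp [solveLoop, altLoop]
  · have hn : (0 : Int) < (A.length : Int) := by
      simp [List.length_pos_iff, hA]
    simp only [Int.toNat_natCast]
    simp only [solveLoop, altLoop]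
    rw [if_pos hn, if_pos hn]
    by_cases hB : 1 ≤ B
    · -- first greedy step at i = 0
      have hrt0 : (0 : Int) ≤ min (0 + B - 1) ((A.length : Int) - 1) := by omega
      rw [if_neg (by omega : ¬ min (0 + B - 1) ((A.length : Int) - 1) < 0)]
      have hprev := prev_getD A (min (0 + B - 1) ((A.length : Int) - 1)) (by omega) (by omega)
      split
      · rename_i j heq
        have hpj := prev_of_scan_some A B 0 _ j _ (by omega) (by omega) heq
        obtain ⟨c1, c2, c3, c4, c5, c6⟩ := solveScan_some A _ B 0 _ _ j heq
        rw [hprev, hpj]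
        rw [if_neg (by omega : ¬ (j = -1 ∨ j < 0 - B + 1))]
        exact loops_eq A B hB A.length (j + B) 1 (by omega) (by omega)
      · rename_i heq
        have hp := prev_of_scan_none A B 0 _ _ (by omega) (by omega) (by omega) heq
        have hgen := lastIdx_ge_neg_one A (min (0 + B - 1) ((A.length : Int) - 1)).toNat
        have hle := lastIdx_le A (min (0 + B - 1) ((A.length : Int) - 1)).toNat
        by_cases hp0 : lastIdx A (min (0 + B - 1) ((A.length : Int) - 1)).toNat = 0
        · -- A refuses the bulb at index 0; B uses it: here ¬D_solve gives an uncovered position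
          rw [hprev, hp0]
          rw [if_neg (by omega : ¬ ((0 : Int) = -1 ∨ (0 : Int) < 0 - B + 1))]
          have hb0 : A.getD 0 0 = 1 := by
            have := lastIdx_bulb A (min (0 + B - 1) ((A.length : Int) - 1)).toNat (by omega)
            rwa [hp0] at this
          have hnob : ∀ k < A.length, A.getD k 0 = 1 → k = 0 ∨ B ≤ (k : Int) := by
            intro k hk hbk
            by_cases hk0 : k = 0
            · exact Or.inl hk0
            · refine Or.inr ?_
              by_contra hlt
              push_neg at hlt
              have hkn : (k : Int) < (A.length : Int) := by exact_mod_cast hk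
              have := solveScan_none A _ B 0 _ _ (by omega) (by omega) heq
                ((k : Nat) : Int) (by omega) (by omega) (by omega)
              rw [PySem.List.pyGetD_natCast] at this
              exact this hbk
          have hcovfail : ¬ (∀ p < A.length, ∃ j < A.length, A.getD j 0 = 1 ∧
              |(p : Int) - (j : Int)| < B) := by
            intro hcov
            exact hnd ⟨hb0, hnob, hcov⟩
          push_neg at hcovfail
          obtain ⟨p0, hp0lt, hp0unc⟩ := hcovfail
          have hunc : ∀ m : Nat, m < A.length → A.getD m 0 = 1 →
              B - 1 < |((p0 : Nat) : Int) - (m : Int)| := by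
            intro m hmn hmb
            have := hp0unc m hmn hmb
            omega
          have hp0B : B ≤ ((p0 : Nat) : Int) := by
            have := hunc 0 (by omega) hb0
            rcases abs_cases (((p0 : Nat) : Int) - ((0 : Nat) : Int)) with ⟨he, _⟩ | ⟨he, _⟩ <;>
              simp at this ⊢ <;> omega
          rw [alt_fail A B hB ((p0 : Nat) : Int) (by omega) (by exact_mod_cast hp0lt) hunc
            A.length (0 + B) (0 + 1) (by omega) (by omega)]
        · rw [hprev, if_pos (by omega :
            lastIdx A (min (0 + B - 1) ((A.length : Int) - 1)).toNat = -1 ∨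
            lastIdx A (min (0 + B - 1) ((A.length : Int) - 1)).toNat < 0 - B + 1)]
    · -- B ≤ 0 : both fail at the first step
      have hrtneg : min (0 + B - 1) ((A.length : Int) - 1) < 0 := by omega
      rw [if_pos hrtneg]
      have hscan : solveScan A (A.length : Int) B 0
          ((min (0 + B - 1) ((A.length : Int) - 1)).toNat + 1)
          (min (0 + B - 1) ((A.length : Int) - 1)) = none := by
        simp only [solveScan]
        rw [if_neg (by omega)]
      split
      · rename_i j heq; rw [heq] at hscan; exact absurd hscan (by simp)
      · rfl

-- ===== VERDICT (by name: the statement is the Claim_ definition above) =====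
theorem solve_spec : Claim_unchanged_solve := by
  intro A B _ hD
  exact main_eq A B hD

theorem solve_changed : Claim_changed_solve := by
  unfold Claim_changed_solve; decide

theorem solve_tight : Claim_exact_solve := by
  intro A B _ hD
  obtain ⟨hb0, hnob, hcov⟩ := hD
  have hA : A ≠ [] := by intro h; subst h; simp at hb0
  have hn : (0 : Int) < (A.length : Int) := by simp [List.length_pos_iff, hA]
  have hB : 1 ≤ B := by
    obtain ⟨j, hjn, hjb, hjd⟩ := hcov 0 (by omega)
    rcases abs_cases (((0 : Nat) : Int) - ((j : Nat) : Int)) with ⟨he, he2⟩ | ⟨he, he2⟩ <;>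
      rw [he] at hjd <;> omega
  have hsolve : solve A B = -1 := by
    rw [solve, show PySem.List.len A = (A.length : Int) from by simp]
    simp only [Int.toNat_natCast, solveLoop]
    rw [if_pos hn]
    split
    · rename_i j heq
      obtain ⟨c1, c2, c3, c4, c5, c6⟩ := solveScan_some A _ B 0 _ _ j heq
      exfalso
      have hjn : j.toNat < A.length := by omega
      rw [pyGetD_toNat A j (by omega)] at c5
      rcases hnob j.toNat hjn c5 with h0 | hge <;> omega
    · rfl
  have hcov' : ∀ p : Nat, p < A.length → ∃ m : Nat, m < A.length ∧ A.getD m 0 = 1 ∧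
      (p : Int) - (m : Int) ≤ B - 1 ∧ (m : Int) - (p : Int) ≤ B - 1 := by
    intro p hp
    obtain ⟨j, hjn, hjb, hjd⟩ := hcov p hp
    rcases abs_cases (((p : Nat) : Int) - ((j : Nat) : Int)) with ⟨he, he2⟩ | ⟨he, he2⟩ <;>
      rw [he] at hjd <;> exact ⟨j, hjn, hjb, by omega, by omega⟩
  have halt : 0 ≤ solve_alt A B := by
    rw [solve_alt, show PySem.List.len A = (A.length : Int) from by simp]
    exact alt_success A B hcov' _ 0 0 le_rfl le_rfl
  intro hEq
  omega
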